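-- pv_equiv track=rewrite | github.com/Dan-jpg2/CSIK_Prog | modul10/o0_to_o5.py | stats_by_hostname_and_username
-- ===== SOURCE A (Python) =====
-- def stats_by_hostname_and_username(auth_log):
--     n = len(auth_log)
--     d = {}
--     i = 0
--     while i < n:
--         hostname, timestamp, username, result = auth_log[i]
--         key = (hostname, username)
--         if key not in d:
--             d[key] = (timestamp, timestamp, 1)
--         else:
--             first, last, count = d[key]
--             if timestamp < first:
--                 first = timestamp
--             if timestamp > last:
--                 last = timestamp
--             count += 1
--             d[key] = (first, last, count)
--         i += 1
--
--     #Omdanner ordbogen til liste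
--     result = []
--     for (hostname, username), (first, last, count) in d.items():
--         result.append((hostname, username, first, last, count))
--     return result
-- ===== SOURCE B (Python) =====
-- def stats_by_hostname_and_username(auth_log):
--     # Pass 1: group all timestamps per (hostname, username), in first-seen key order.
--     groups = {}
--     for hostname, timestamp, username, _result in auth_log:
--         groups.setdefault((hostname, username), []).append(timestamp)
--     # Pass 2: reduce each group to (first, last, count).
--     stats = []
--     for (hostname, username), timestamps in groups.items():
--         stats.append((hostname, username, min(timestamps), max(timestamps), len(timestamps)))
--     return stats
-- ===== Notes on version B (the rewrite author's own statement) =====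
-- stated objective: alternative
-- what changed: B separates collection from reduction: one pass builds a dict mapping (hostname, username) to the list of all its timestamps, then a second pass reduces each group with min/max/len, instead of A's single pass maintaining running (first, last, count) triples with manual comparisons.
import Mathlib
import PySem

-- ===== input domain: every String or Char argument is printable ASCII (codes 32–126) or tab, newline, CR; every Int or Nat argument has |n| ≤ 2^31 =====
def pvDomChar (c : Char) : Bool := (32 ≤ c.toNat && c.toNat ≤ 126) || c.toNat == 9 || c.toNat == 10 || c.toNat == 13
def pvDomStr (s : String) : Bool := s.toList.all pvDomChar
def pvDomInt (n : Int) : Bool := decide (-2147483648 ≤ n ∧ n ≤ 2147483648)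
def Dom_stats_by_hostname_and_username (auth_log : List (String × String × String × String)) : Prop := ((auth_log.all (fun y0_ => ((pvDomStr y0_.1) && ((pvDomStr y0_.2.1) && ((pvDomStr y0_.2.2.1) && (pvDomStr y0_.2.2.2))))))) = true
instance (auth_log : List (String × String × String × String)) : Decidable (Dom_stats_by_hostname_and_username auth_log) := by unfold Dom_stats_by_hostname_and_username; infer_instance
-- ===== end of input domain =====

-- B replaces A's single pass with running (first,last,count) triples by a group-then-reduce
-- decomposition (dict of timestamp lists, then min/max/len per group); alternative, not faster.

-- ===== PORT A =====
-- while-loop over indices ported as a fold over the list (same elements, same order)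
def stats_by_hostname_and_username (auth_log : List (String × String × String × String)) : List (String × String × String × String × Int) :=
  let d : PySem.Dict (String × String) (String × String × Int) :=
    auth_log.foldl (fun d p =>
      let hostname := p.1; let timestamp := p.2.1; let username := p.2.2.1
      let key := (hostname, username)
      if ¬ d.contains key then
        d.insert key (timestamp, timestamp, 1)
      else
        let cur := d.getD key ("", "", 0)   -- d[key]; key is present here
        let first := if timestamp < cur.1 then timestamp else cur.1
        let last := if timestamp > cur.2.1 then timestamp else cur.2.1
        d.insert key (first, last, cur.2.2 + 1)) PySem.Dict.empty
  d.items.foldl (fun result kv =>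
    result ++ [(kv.1.1, kv.1.2, kv.2.1, kv.2.2.1, kv.2.2.2)]) []

-- ===== PORT B =====
-- groups.setdefault(key, []).append(timestamp) is Dict.modify key [] (· ++ [timestamp]);
-- min(ts)/max(ts) on a nonempty group via PySem.List.min?/max? (the .getD "" default is never hit)
def stats_by_hostname_and_username_alt (auth_log : List (String × String × String × String)) : List (String × String × String × String × Int) :=
  let groups : PySem.Dict (String × String) (List String) :=
    auth_log.foldl (fun g p => g.modify (p.1, p.2.2.1) [] (· ++ [p.2.1])) PySem.Dict.empty
  groups.items.foldl (fun stats kv =>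
    stats ++ [(kv.1.1, kv.1.2,
      (PySem.List.min? kv.2 (fun x => x)).getD "",
      (PySem.List.max? kv.2 (fun x => x)).getD "",
      (kv.2.length : Int))]) []

-- ===== PRECONDITION & SPEC =====
def Spec_stats_by_hostname_and_username (auth_log : List (String × String × String × String)) (out : List (String × String × String × String × Int)) : Prop := out = stats_by_hostname_and_username_alt auth_log
instance (auth_log : List (String × String × String × String)) (out : List (String × String × String × String × Int)) : Decidable (Spec_stats_by_hostname_and_username auth_log out) := by unfold Spec_stats_by_hostname_and_username; infer_instance

-- ===== CLAIM (what is proved, stated in full; the proofs are below) =====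
def Claim_equal_stats_by_hostname_and_username : Prop := ∀ (auth_log : List (String × String × String × String)), Dom_stats_by_hostname_and_username auth_log → Spec_stats_by_hostname_and_username auth_log (stats_by_hostname_and_username auth_log)

-- ===== LEMMAS AND PROOFS =====

-- the record's key, and A's per-record dict-value update
def pvKey (p : String × String × String × String) : String × String := (p.1, p.2.2.1)

def pvUpd (cur : String × String × Int) (t : String) : String × String × Int :=
  (if t < cur.1 then t else cur.1, if t > cur.2.1 then t else cur.2.1, cur.2.2 + 1)

-- B's per-group reduction
def pvRed (ts : List String) : String × String × Int :=
  ((PySem.List.min? ts (fun x => x)).getD "", (PySem.List.max? ts (fun x => x)).getD "", (ts.length : Int))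

def pvStepA (d : PySem.Dict (String × String) (String × String × Int)) (p : String × String × String × String) : PySem.Dict (String × String) (String × String × Int) :=
  if ¬ d.contains (pvKey p) then
    d.insert (pvKey p) (p.2.1, p.2.1, 1)
  else
    d.insert (pvKey p) (pvUpd (d.getD (pvKey p) ("", "", 0)) p.2.1)

lemma pvStepA_eq_insert (d : PySem.Dict (String × String) (String × String × Int)) (p : String × String × String × String) :
    pvStepA d p = d.insert (pvKey p)
      (if ¬ d.contains (pvKey p) then (p.2.1, p.2.1, 1) else pvUpd (d.getD (pvKey p) ("", "", 0)) p.2.1) := by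
  unfold pvStepA; split <;> rfl

-- A's fold characterised through get?
lemma pvA_get? (l : List (String × String × String × String)) (d : PySem.Dict (String × String) (String × String × Int)) (k : String × String) :
    (l.foldl pvStepA d).get? k =
      match d.get? k with
      | some cur => some (((l.filter (fun p => pvKey p == k)).map (·.2.1)).foldl pvUpd cur)
      | none =>
        match (l.filter (fun p => pvKey p == k)).map (·.2.1) with
        | [] => none
        | t :: ts => some (ts.foldl pvUpd (t, t, 1)) := by
  induction l generalizing d with
  | nil => cases h : d.get? k <;> simp [h]
  | cons p rest ih =>
    simp only [List.foldl_cons, List.filter_cons]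
    by_cases hk : pvKey p = k
    · subst hk
      have hc : (pvStepA d p).get? (pvKey p) =
          some (if ¬ d.contains (pvKey p) then (p.2.1, p.2.1, 1) else pvUpd (d.getD (pvKey p) ("", "", 0)) p.2.1) := by
        rw [pvStepA_eq_insert]; exact PySem.Dict.get?_insert_self _ _ _
      rw [ih, hc]
      cases h : d.get? (pvKey p) with
      | some cur =>
        have hcon : d.contains (pvKey p) = true := by
          rw [PySem.Dict.contains_eq_isSome_get?, h]; rfl
        have hgd : d.getD (pvKey p) ("", "", 0) = cur := PySem.Dict.getD_of_get?_eq_some d ("", "", 0) h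
        simp [hcon, hgd]
      | none =>
        have hcon : d.contains (pvKey p) = false := by
          rw [PySem.Dict.contains_eq_isSome_get?, h]; rfl
        simp [hcon]
    · have hne : (pvKey p == k) = false := by simp [hk]
      have hget : (pvStepA d p).get? k = d.get? k := by
        rw [pvStepA_eq_insert]; exact PySem.Dict.get?_insert_of_ne d _ (Ne.symm hk)
      rw [ih, hget, hne]
      simp

-- A's running triple over a group equals B's reduction of the group
lemma pvRun_eq_red (t : String) (ts : List String) :
    ts.foldl pvUpd (t, t, 1) = pvRed (t :: ts) := by
  have hmin : (fun (x y : String) => if y < x then y else x) = min := by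
    funext x y
    rcases lt_or_ge y x with h | h
    · simp [h, min_def, not_le.mpr h]
    · simp [not_lt.mpr h, h]
  have hmax : (fun (x y : String) => if y > x then y else x) = max := by
    funext x y
    rcases lt_or_ge x y with h | h
    · simp [h, le_of_lt h]
    · rcases eq_or_lt_of_le h with h2 | h2
      · simp [h2]
      · simp [not_lt.mpr h, max_def, not_le.mpr h2]
  have key : ∀ (ts : List String) (a b : String) (c : Int),
      ts.foldl pvUpd (a, b, c) =
        (ts.foldl (fun x y => if y < x then y else x) a,
         ts.foldl (fun x y => if y > x then y else x) b,
         c + ts.length) := by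
    intro ts
    induction ts with
    | nil => intro a b c; simp
    | cons u us ih =>
      intro a b c
      simp only [List.foldl_cons, pvUpd, ih]
      refine congrArg _ (congrArg _ ?_)
      simp [List.length_cons]
      ring
  rw [key, hmin, hmax]
  unfold pvRed
  rw [PySem.List.min?_id_cons, PySem.List.max?_id_cons]
  simp [List.length_cons]
  omega

-- the two result-building append loops are maps over items
lemma pvFoldlAppend {α β : Type} (l : List α) (f : α → β) (acc : List β) :
    l.foldl (fun r x => r ++ [f x]) acc = acc ++ l.map f := by
  induction l generalizing acc with
  | nil => simp
  | cons x xs ih => simp [ih]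

theorem stats_by_hostname_and_username_spec : Claim_equal_stats_by_hostname_and_username := by
  unfold Claim_equal_stats_by_hostname_and_username
  intro log _hdom
  unfold Spec_stats_by_hostname_and_username
  unfold stats_by_hostname_and_username stats_by_hostname_and_username_alt
  -- name the two dictionaries
  set dA := log.foldl pvStepA (PySem.Dict.empty) with hdA
  have hAfold : (log.foldl (fun d (p : String × String × String × String) =>
      let hostname := p.1; let timestamp := p.2.1; let username := p.2.2.1
      let key := (hostname, username)
      if ¬ d.contains key then
        d.insert key (timestamp, timestamp, 1)
      else
        let cur := d.getD key ("", "", 0)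
        let first := if timestamp < cur.1 then timestamp else cur.1
        let last := if timestamp > cur.2.1 then timestamp else cur.2.1
        d.insert key (first, last, cur.2.2 + 1)) PySem.Dict.empty) = dA := rfl
  set dB := log.foldl (fun (g : PySem.Dict (String × String) (List String)) p =>
      g.modify (p.1, p.2.2.1) [] (· ++ [p.2.1])) PySem.Dict.empty with hdB
  rw [hAfold, pvFoldlAppend, pvFoldlAppend]
  simp only [List.nil_append]
  -- keys of both dictionaries
  have hstep : pvStepA = fun d p => d.insert (pvKey p)
      (if ¬ d.contains (pvKey p) then (p.2.1, p.2.1, 1)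
       else pvUpd (d.getD (pvKey p) ("", "", 0)) p.2.1) := by
    funext d p; exact pvStepA_eq_insert d p
  have hkA : dA.keys = PySem.Set.ofList (log.map pvKey) := by
    rw [hdA, hstep, PySem.Dict.keys_foldl_insert_key log pvKey]
    simp [PySem.Set.update_nil_left]
  have hkB : dB.keys = PySem.Set.ofList (log.map pvKey) := by
    rw [hdB, PySem.Dict.keys_foldl_modify_key log (fun p => (p.1, p.2.2.1))
      [] (fun _ p ts => ts ++ [p.2.1])]
    unfold pvKey
    simp [PySem.Set.update_nil_left]
  have hndA : dA.keys.Nodup := by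
    rw [hkA]; exact PySem.Set.nodup_ofList _
  have hndB : dB.keys.Nodup := by
    rw [hkB]; exact PySem.Set.nodup_ofList _
  -- express both items lists through keys and getD
  rw [PySem.Dict.items_eq_map_keys dA hndA ("", "", 0),
      PySem.Dict.items_eq_map_keys dB hndB []]
  rw [hkA, hkB]
  simp only [List.map_map]
  apply List.map_congr_left
  intro k hk
  have hkmem : k ∈ log.map pvKey := (PySem.Set.mem_ofList _ _).mp hk
  -- the group of k is nonempty
  obtain ⟨p0, hp0, hkey0⟩ := List.mem_map.mp hkmem
  have hfilter : p0 ∈ log.filter (fun p => pvKey p == k) := by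
    rw [List.mem_filter]
    exact ⟨hp0, by simp [hkey0]⟩
  -- B's group for k
  have hBgetD : dB.getD k [] = (log.filter (fun p => pvKey p == k)).map (·.2.1) := by
    have hmapfold : dB = (log.map (fun p => (pvKey p, p.2.1))).foldl
        (fun d q => d.modify q.1 [] (· ++ [q.2])) PySem.Dict.empty := by
      rw [hdB, List.foldl_map]; rfl
    rw [hmapfold, PySem.Dict.getD_foldl_modify_append]
    simp [List.filter_map, List.map_map, Function.comp_def]
  -- destructure the nonempty group
  obtain ⟨t, ts, hts⟩ : ∃ t ts, (log.filter (fun p => pvKey p == k)).map (·.2.1) = t :: ts := by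
    cases hcase : (log.filter (fun p => pvKey p == k)).map (·.2.1) with
    | nil =>
      exfalso
      have : p0.2.1 ∈ (log.filter (fun p => pvKey p == k)).map (·.2.1) :=
        List.mem_map.mpr ⟨p0, hfilter, rfl⟩
      rw [hcase] at this; exact absurd this (List.not_mem_nil)
    | cons t ts => exact ⟨t, ts, rfl⟩
  -- A's value for k
  have hAget : dA.get? k = some (ts.foldl pvUpd (t, t, 1)) := by
    rw [hdA, pvA_get? log PySem.Dict.empty k]
    rw [PySem.Dict.get?_empty]
    rw [hts]
  have hAgetD : dA.getD k ("", "", 0) = ts.foldl pvUpd (t, t, 1) :=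
    PySem.Dict.getD_of_get?_eq_some dA ("", "", 0) hAget
  -- combine
  simp only [Function.comp]
  rw [hAgetD, hBgetD, hts, pvRun_eq_red]
  rfl
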